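-- pv_equiv track=rewrite | github.com/jconorgrogan/Rotational-Numbers | Code for charts/PrimeCompositesScaledCompared.py | match_composites_to_primes
-- ===== SOURCE A (Python) =====
-- def match_composites_to_primes(primes, limit):
--     composites = []
--     candidate = 4
--     prime_index = 0
--     while candidate <= limit and prime_index < len(primes):
--         is_composite = any(candidate % divisor == 0 for divisor in range(2, candidate))
--         if is_composite:
--             if len(composites) < prime_index:
--                 composites.append(candidate)
--             else:
--                 # Stretching: Adding composites to match the current prime index
--                 while len(composites) < prime_index:
--                     composites.append(candidate)
--         if candidate >= primes[prime_index]: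
--             prime_index += 1
--         candidate += 1
--     return composites
-- ===== SOURCE B (Python) =====
-- def _is_composite(c):
--     d = 2
--     while d * d <= c:
--         if c % d == 0:
--             return True
--         d += 1
--     return False
--
-- def match_composites_to_primes(primes, limit):
--     composites = []
--     cur = 4
--     for i, p in enumerate(primes):
--         # prime index i is current exactly for candidates cur .. min(limit, max(cur, p))
--         end = min(limit, max(cur, p))
--         for c in range(cur, end + 1):
--             if len(composites) < i and _is_composite(c):
--                 composites.append(c)
--         if max(cur, p) > limit:
--             break
--         cur = end + 1
--     return composites
-- ===== Notes on version B (the rewrite author's own statement) =====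
-- stated objective: faster
-- what changed: B iterates over the primes LIST (one interval of candidates per prime index) instead of A's single interleaved while-loop over candidates, replaces A's full range(2, candidate) trial division with a sqrt-bounded divisor loop guarded by the cheap length check, and drops A's dead inner stretching while-loop.
import Mathlib
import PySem

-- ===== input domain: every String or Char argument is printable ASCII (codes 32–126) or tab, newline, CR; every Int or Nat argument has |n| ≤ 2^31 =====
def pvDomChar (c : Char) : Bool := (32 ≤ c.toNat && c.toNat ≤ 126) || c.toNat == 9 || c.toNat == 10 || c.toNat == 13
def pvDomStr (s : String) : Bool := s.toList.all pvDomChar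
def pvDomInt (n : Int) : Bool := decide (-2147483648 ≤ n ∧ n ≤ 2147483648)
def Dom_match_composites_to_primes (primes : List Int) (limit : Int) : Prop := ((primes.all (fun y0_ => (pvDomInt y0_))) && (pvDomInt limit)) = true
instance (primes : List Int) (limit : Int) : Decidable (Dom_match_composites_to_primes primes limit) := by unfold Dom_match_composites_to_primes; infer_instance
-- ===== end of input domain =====

-- B iterates over the primes list (one candidate interval per prime index) instead of A's
-- interleaved while-loop, uses a sqrt-bounded divisor test behind the cheap length check,
-- and drops A's dead inner "stretching" while-loop; timing run reported B faster.

-- ===== PORT A =====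
-- inner `while len(composites) < prime_index: composites.append(candidate)`; the fuel
-- (second-to-last arg) bounds the appends: when it is 0 the guard is already false
def stretchA (candidate : Int) (pi : Nat) : Nat → List Int → List Int
  | 0, composites => composites
  | k + 1, composites =>
    if composites.length < pi then stretchA candidate pi k (composites ++ [candidate])
    else composites

-- the main `while candidate <= limit and prime_index < len(primes)` loop of A;
-- fuel = (limit + 1 - candidate).toNat, so fuel > 0 ↔ candidate ≤ limit
def loopA (primes : List Int) (limit : Int) : Nat → List Int → Int → Nat → List Int
  | 0, composites, _, _ => composites
  | fuel + 1, composites, candidate, pi =>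
    if pi < primes.length then
      -- any(candidate % divisor == 0 for divisor in range(2, candidate))
      let isComp := (PySem.List.pyRange 2 candidate 1).any
          (fun d => PySem.Int.mod candidate d == 0)
      let composites' :=
        if isComp then
          if composites.length < pi then composites ++ [candidate]
          else stretchA candidate pi (pi - composites.length) composites
        else composites
      -- primes[prime_index]: the guard pi < primes.length makes getD exact here
      let pi' := if primes.getD pi 0 ≤ candidate then pi + 1 else pi
      loopA primes limit fuel composites' (candidate + 1) pi'
    else composites

def match_composites_to_primes (primes : List Int) (limit : Int) : List Int :=
  loopA primes limit (limit + 1 - 4).toNat [] 4 0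

-- ===== PORT B =====
-- `while d * d <= c: if c % d == 0: return True; d += 1` of _is_composite;
-- fuel bounds the iterations: it starts at (c + 1 - 2).toNat; when it reaches 0,
-- d > c and the guard d * d ≤ c is already false
def divGo (c : Int) : Nat → Int → Bool
  | 0, _ => false
  | k + 1, d =>
    if d * d ≤ c then
      if PySem.Int.mod c d == 0 then true else divGo c k (d + 1)
    else false

def isCompositeB (c : Int) : Bool := divGo c (c + 1 - 2).toNat 2

-- body of B's inner `for c in range(cur, end + 1)` loop
def stepB (i : Nat) (acc : List Int) (c : Int) : List Int :=
  if acc.length < i && isCompositeB c then acc ++ [c] else acc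

-- B's outer `for i, p in enumerate(primes)` loop: structural recursion on the primes list
def goB (limit : Int) : List Int → Nat → Int → List Int → List Int
  | [], _, _, composites => composites
  | p :: rest, i, cur, composites =>
    let e := min limit (max cur p)
    let composites' := (PySem.List.pyRange cur (e + 1) 1).foldl (stepB i) composites
    if limit < max cur p then composites'            -- `break`
    else goB limit rest (i + 1) (e + 1) composites'

def match_composites_to_primes_alt (primes : List Int) (limit : Int) : List Int :=
  goB limit primes 0 4 []

-- ===== PRECONDITION & SPEC =====
def Spec_match_composites_to_primes (primes : List Int) (limit : Int) (out : List Int) : Prop := out = match_composites_to_primes_alt primes limit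
instance (primes : List Int) (limit : Int) (out : List Int) : Decidable (Spec_match_composites_to_primes primes limit out) := by unfold Spec_match_composites_to_primes; infer_instance

-- ===== CLAIM (what is proved, stated in full; the proofs are below) =====
def Claim_equal_match_composites_to_primes : Prop := ∀ (primes : List Int) (limit : Int), Dom_match_composites_to_primes primes limit → Spec_match_composites_to_primes primes limit (match_composites_to_primes primes limit)

-- ===== LEMMAS AND PROOFS =====

-- A's "stretching" while-loop is dead code: it only runs when its condition is already false
lemma stretchA_of_ge (candidate : Int) (pi : Nat) (k : Nat) (composites : List Int)
    (h : ¬ composites.length < pi) : stretchA candidate pi k composites = composites := by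
  cases k with
  | zero => rfl
  | succ k => rw [stretchA, if_neg h]

lemma divGo_iff :
    ∀ (n : Nat) (c d : Int), (c + 1 - d).toNat ≤ n → 1 ≤ d →
      (divGo c n d = true ↔ ∃ e, d ≤ e ∧ e * e ≤ c ∧ e ∣ c) := by
  intro n
  induction n with
  | zero =>
    intro c d hn hd1
    have hcd : c < d := by omega
    simp only [divGo, Bool.false_eq_true, false_iff]
    rintro ⟨e, he1, he2, he3⟩
    nlinarith
  | succ n ih =>
    intro c d hn hd1
    rw [divGo]
    by_cases hdd : d * d ≤ c
    · have hdc : d ≤ c := by nlinarith [mul_self_nonneg (2 * d - 1)]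
      rw [if_pos hdd]
      by_cases hm : PySem.Int.mod c d = 0
      · rw [if_pos (by simpa using hm)]
        simp only [true_iff]
        exact ⟨d, le_refl d, hdd, (PySem.Int.mod_eq_zero_iff_dvd c d).mp hm⟩
      · rw [if_neg (by simpa using hm), ih c (d + 1) (by omega) (by omega)]
        constructor
        · rintro ⟨e, he1, he2, he3⟩; exact ⟨e, by omega, he2, he3⟩
        · rintro ⟨e, he1, he2, he3⟩
          refine ⟨e, ?_, he2, he3⟩
          have hne : d ≠ e := by
            rintro rfl
            exact hm ((PySem.Int.mod_eq_zero_iff_dvd c d).mpr he3)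
          omega
    · rw [if_neg hdd]
      simp only [Bool.false_eq_true, false_iff]
      rintro ⟨e, he1, he2, he3⟩
      exact hdd (le_trans (by nlinarith) he2)

-- the two compositeness tests agree for every candidate the loops test (candidate ≥ 4)
lemma comp_eq (c : Int) (hc : 4 ≤ c) :
    (PySem.List.pyRange 2 c 1).any (fun d => PySem.Int.mod c d == 0) = isCompositeB c := by
  apply Bool.eq_iff_iff.mpr
  rw [List.any_eq_true, isCompositeB,
    divGo_iff (c + 1 - 2).toNat c 2 (by omega) (by omega)]
  constructor
  · rintro ⟨d, hmem, hd⟩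
    rw [PySem.List.mem_pyRange_one] at hmem
    have hdvd : d ∣ c := (PySem.Int.mod_eq_zero_iff_dvd c d).mp (by simpa using hd)
    obtain ⟨k, hk⟩ := hdvd
    have hd2 : 2 ≤ d := hmem.1
    have hk2 : 2 ≤ k := by nlinarith [hmem.2]
    rcases le_total d k with hdk | hkd
    · exact ⟨d, hd2, by nlinarith, ⟨k, hk⟩⟩
    · exact ⟨k, hk2, by nlinarith, ⟨d, by rw [hk]; ring⟩⟩
  · rintro ⟨e, he1, he2, he3⟩
    refine ⟨e, ?_, by simpa using (PySem.Int.mod_eq_zero_iff_dvd c e).mpr he3⟩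
    rw [PySem.List.mem_pyRange_one]
    exact ⟨he1, by nlinarith⟩

-- one iteration of A's body updates the list exactly as B's stepB does
lemma stepA_eq (pi : Nat) (composites : List Int) (c : Int) (hc : 4 ≤ c) :
    (if (PySem.List.pyRange 2 c 1).any (fun d => PySem.Int.mod c d == 0) then
      if composites.length < pi then composites ++ [c]
      else stretchA c pi (pi - composites.length) composites
    else composites) = stepB pi composites c := by
  rw [comp_eq c hc, stepB]
  rcases Bool.eq_false_or_eq_true (isCompositeB c) with hcmp | hcmp <;>
    by_cases hlen : composites.length < pi <;>
    simp [hcmp, hlen, stretchA_of_ge]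

-- A's loop, run from `cur` while prime_index stays `pi`, performs exactly B's foldl over
-- the interval cur .. min limit (max cur p), then either stops (past limit) or continues
-- at the next candidate with prime_index pi+1
lemma intervalA (primes : List Int) (limit : Int) (pi : Nat) (hpi : pi < primes.length) :
    ∀ (k : Nat) (cur : Int) (composites : List Int),
      (limit + 1 - cur).toNat = k → 4 ≤ cur →
      loopA primes limit k composites cur pi =
        (let p := primes.getD pi 0
         let e := min limit (max cur p)
         let composites' := (PySem.List.pyRange cur (e + 1) 1).foldl (stepB pi) composites
         if limit < max cur p then composites'
         else loopA primes limit (limit + 1 - (e + 1)).toNat composites' (e + 1) (pi + 1)) := by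
  intro k
  induction k with
  | zero =>
    intro cur composites hk hcur
    have hlim : limit < cur := by omega
    simp only [loopA]
    rw [PySem.List.pyRange_one_eq_nil (by omega)]
    rw [if_pos (by omega)]
    rfl
  | succ k ih =>
    intro cur composites hk hcur
    have hcl : cur ≤ limit := by omega
    rw [loopA, if_pos hpi]
    simp only
    rw [stepA_eq pi composites cur hcur]
    by_cases hp : primes.getD pi 0 ≤ cur
    · -- prime reached at cur: prime_index advances, the interval is just [cur]
      rw [if_pos hp]
      have hmax : max cur (primes.getD pi 0) = cur := by omega
      simp only [hmax]
      have he : min limit cur = cur := by omega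
      rw [he, if_neg (by omega), PySem.List.pyRange_one_cons (by omega),
        PySem.List.pyRange_one_eq_nil (le_refl (cur + 1))]
      simp only [List.foldl_cons, List.foldl_nil]
      congr 1
      omega
    · -- prime not reached: prime_index stays pi; peel one candidate and use the IH
      rw [if_neg hp]
      rw [ih (cur + 1) (stepB pi composites cur) (by omega) (by omega)]
      have hcp : cur < primes.getD pi 0 := by omega
      have hmax : max cur (primes.getD pi 0) = primes.getD pi 0 := by omega
      have hmax1 : max (cur + 1) (primes.getD pi 0) = primes.getD pi 0 := by omega
      simp only [hmax, hmax1]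
      have hcons : PySem.List.pyRange cur (min limit (primes.getD pi 0) + 1) 1
          = cur :: PySem.List.pyRange (cur + 1) (min limit (primes.getD pi 0) + 1) 1 :=
        PySem.List.pyRange_one_cons (by omega)
      rw [hcons]
      rfl

-- main bridge: A's fueled loop at prime_index pi equals B's recursion over primes.drop pi
lemma loop_eq (primes : List Int) (limit : Int) :
    ∀ (rest : List Int) (pi : Nat) (cur : Int) (composites : List Int),
      primes.drop pi = rest → 4 ≤ cur →
      loopA primes limit (limit + 1 - cur).toNat composites cur pi
        = goB limit rest pi cur composites := by
  intro rest
  induction rest with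
  | nil =>
    intro pi cur composites hdrop hcur
    have hlen : primes.length ≤ pi := List.drop_eq_nil_iff.mp hdrop
    cases hfk : (limit + 1 - cur).toNat with
    | zero => rfl
    | succ k => rw [loopA, if_neg (by omega)]; rfl
  | cons p rest ih =>
    intro pi cur composites hdrop hcur
    have hpi : pi < primes.length := by
      by_contra h
      rw [List.drop_eq_nil_of_le (by omega)] at hdrop
      exact List.cons_ne_nil _ _ hdrop.symm
    have hget : primes.getD pi 0 = p := by
      have := List.drop_eq_getElem_cons (l := primes) (i := pi) hpi
      rw [hdrop] at this
      have hp : primes[pi] = p := by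
        injection this with h1 h2
        exact h1.symm
      simp [List.getD, hp, List.getElem?_eq_getElem hpi]
    have hdrop1 : primes.drop (pi + 1) = rest := by
      have := List.drop_eq_getElem_cons (l := primes) (i := pi) hpi
      rw [hdrop] at this
      injection this with h1 h2
      exact h2.symm
    rw [intervalA primes limit pi hpi (limit + 1 - cur).toNat cur composites rfl hcur]
    simp only [hget]
    rw [goB]
    by_cases hbr : limit < max cur p
    · rw [if_pos hbr, if_pos hbr]
    · rw [if_neg hbr, if_neg hbr]
      exact ih (pi + 1) (min limit (max cur p) + 1) _ hdrop1 (by omega)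

-- ===== VERDICT (by name: the statement is the Claim_ definition above) =====
theorem match_composites_to_primes_spec : Claim_equal_match_composites_to_primes := by
  intro primes limit _
  unfold Spec_match_composites_to_primes match_composites_to_primes match_composites_to_primes_alt
  exact loop_eq primes limit primes 0 4 [] rfl (by norm_num)
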